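-- pv_equiv track=rewrite | github.com/giovannivarr/Complexity-of-Locally-Fair-Allocations-on-Graphs | code/position_assignment_generator.py | generate_all_assignments
-- ===== SOURCE A (Python) =====
-- from typing import List, Dict, Tuple
--
-- def generate_assignments(agents: List[int], vertices: List[int]) -> Dict[int, int]:
--     """
--     Returns a dictionary containing a position assignment.
--
--     :param agents: the list of agents.
--     :param vertices: the list of vertices.
--     :return: a dictionary containing a single position assignment.
--     """
--     assert len(agents) == len(vertices), 'The number of agents must be equal to the number of vertices.'
--
--     if len(agents) == 0:
--         yield {}
--         return
--     else:
--         assignment = {}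
--         a = agents[0]
--         for p in range(len(vertices)):
--             assignment.update({a: vertices[p]})
--             for rest in generate_assignments(agents[1:], vertices[:p] + vertices[p + 1:]):
--                 assignment.update(rest)
--                 yield assignment
--
-- def generate_all_assignments(agents: List[int], vertices: List[int]) -> List[Dict[int, int]]:
--     """
--     Returns a list containing all possible position assignments given a list of agents and one of vertices.
--
--     :param agents: the list of agents.
--     :param vertices: the list of vertices.
--     :return: a list containing all possible position assignments, represented as a dictionary where each key is an agent
--     and its value the position to which she is assigned.
--     """
--     assert len(agents) == len(vertices), 'The number of agents should be equal to the number of vertices.'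
--
--     assignments = []
--     for x in generate_assignments(agents, vertices):
--         y = {}
--         y.update(x)
--         assignments.append(y)
--     return assignments
-- ===== SOURCE B (Python) =====
-- from typing import List, Dict
--
--
-- def generate_all_assignments(agents: List[int], vertices: List[int]) -> List[Dict[int, int]]:
--     """
--     Returns a list containing all possible position assignments given a list of agents and one of vertices.
--
--     Iterative breadth-first construction: a worklist of (prefix, remaining-vertices)
--     states is expanded one position per round; no recursion, no shared mutable dict.
--     """
--     assert len(agents) == len(vertices), 'The number of agents should be equal to the number of vertices.'
--
--     states = [([], vertices)]
--     for _ in vertices: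
--         states = [(pre + [rem[i]], rem[:i] + rem[i + 1:])
--                   for pre, rem in states
--                   for i in range(len(rem))]
--     return [dict(zip(agents, pre)) for pre, _ in states]
-- ===== Notes on version B (the rewrite author's own statement) =====
-- stated objective: simpler
-- what changed: Replaces the recursive generator with its shared in-place-mutated dict (insert, update with each recursive yield, copy on collection) by an iterative breadth-first worklist of (prefix, remaining) states expanded one position per round, building each assignment at the end as dict(zip(agents, prefix)).
import Mathlib
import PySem

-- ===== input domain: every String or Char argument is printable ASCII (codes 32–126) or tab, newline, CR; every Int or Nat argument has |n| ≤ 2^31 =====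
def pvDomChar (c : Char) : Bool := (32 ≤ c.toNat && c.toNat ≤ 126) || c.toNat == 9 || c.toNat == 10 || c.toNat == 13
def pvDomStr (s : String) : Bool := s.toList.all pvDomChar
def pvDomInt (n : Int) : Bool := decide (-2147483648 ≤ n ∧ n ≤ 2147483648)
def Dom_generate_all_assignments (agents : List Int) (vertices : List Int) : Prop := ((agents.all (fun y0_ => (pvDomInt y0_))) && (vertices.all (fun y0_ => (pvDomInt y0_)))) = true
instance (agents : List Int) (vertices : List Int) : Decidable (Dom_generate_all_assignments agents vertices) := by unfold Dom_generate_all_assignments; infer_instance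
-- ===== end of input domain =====

-- B replaces A's recursive generator over a shared in-place-mutated dict by an iterative
-- breadth-first worklist of (prefix, remaining) states; same value, similar cost (objective: simpler).

-- ===== PORT A =====
-- Port of the recursive generator `generate_assignments`: the list of yielded snapshots of the
-- single mutated dict `assignment`, threaded as the first component of the fold state.
-- `vertices[p]` with p ∈ range(len(vertices)) is in range, so `getD p 0` is exact here.
def generate_assignments : List Int → List Int → List (PySem.Dict Int Int)
  | [], _ => [PySem.Dict.empty]
  | a :: tl, vertices =>
      (List.foldl
        (fun (st : PySem.Dict Int Int × List (PySem.Dict Int Int)) p =>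
          List.foldl
            (fun (st2 : PySem.Dict Int Int × List (PySem.Dict Int Int)) r =>
              (st2.1.update r.items, st2.2 ++ [st2.1.update r.items]))
            (st.1.insert a (vertices.getD p 0), st.2)
            (generate_assignments tl (vertices.take p ++ vertices.drop (p + 1))))
        ((PySem.Dict.empty : PySem.Dict Int Int), ([] : List (PySem.Dict Int Int)))
        (List.range vertices.length)).2

-- The assert (AssertionError when len(agents) ≠ len(vertices)) is excluded by Pre_.
def generate_all_assignments (agents : List Int) (vertices : List Int) : List (List (Int × Int)) :=
  (generate_assignments agents vertices).map
    (fun x => ((PySem.Dict.empty : PySem.Dict Int Int).update x.items).items)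

-- ===== PORT B =====
-- The assert (AssertionError when len(agents) ≠ len(vertices)) is excluded by Pre_.
-- `rem[i]` with i ∈ range(len(rem)) is in range, so `getD i 0` is exact here.
def generate_all_assignments_alt (agents : List Int) (vertices : List Int) : List (List (Int × Int)) :=
  let states := vertices.foldl
    (fun (states : List (List Int × List Int)) _ =>
      states.flatMap (fun s =>
        (List.range s.2.length).map (fun i =>
          (s.1 ++ [s.2.getD i 0], s.2.take i ++ s.2.drop (i + 1)))))
    [(([] : List Int), vertices)]
  states.map (fun s => (PySem.Dict.ofList (agents.zip s.1)).items)

-- ===== PRECONDITION & SPEC =====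
-- Pre_ excludes exactly the inputs where both Pythons raise AssertionError: unequal lengths.
def Pre_generate_all_assignments (agents : List Int) (vertices : List Int) : Prop :=
  agents.length = vertices.length
instance (agents : List Int) (vertices : List Int) : Decidable (Pre_generate_all_assignments agents vertices) := by unfold Pre_generate_all_assignments; infer_instance
def pvWitness_generate_all_assignments : List Int × List Int := ([1, 2], [5, 7])

def Spec_generate_all_assignments (agents : List Int) (vertices : List Int) (out : List (List (Int × Int))) : Prop := out = generate_all_assignments_alt agents vertices
instance (agents : List Int) (vertices : List Int) (out : List (List (Int × Int))) : Decidable (Spec_generate_all_assignments agents vertices out) := by unfold Spec_generate_all_assignments; infer_instance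

-- ===== CLAIM (what is proved, stated in full; the proofs are below) =====
def Claim_equal_generate_all_assignments : Prop := ∀ (agents : List Int) (vertices : List Int), Dom_generate_all_assignments agents vertices → Pre_generate_all_assignments agents vertices → Spec_generate_all_assignments agents vertices (generate_all_assignments agents vertices)

-- ===== LEMMAS AND PROOFS =====

-- Last value written for key k by the write sequence ps (Python dict overwrite semantics).
def pvLV (ps : List (Int × Int)) (k : Int) : Option Int :=
  ps.foldl (fun o p => if p.1 = k then some p.2 else o) none

-- All states reachable from s in n rounds of B's expansion step (proof-side mirror of B's step).
def pvExpandN : Nat → List Int × List Int → List (List Int × List Int)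
  | 0, s => [s]
  | n + 1, s => (List.range s.2.length).flatMap
      (fun i => pvExpandN n (s.1 ++ [s.2.getD i 0], s.2.take i ++ s.2.drop (i + 1)))

theorem pvUpdate_cons (d : PySem.Dict Int Int) (q : Int × Int) (ps : List (Int × Int)) :
    d.update (q :: ps) = (d.insert q.1 q.2).update ps := by
  simp [PySem.Dict.update]

theorem pvLV_foldl (ps : List (Int × Int)) (k : Int) (o : Option Int) :
    ps.foldl (fun o p => if p.1 = k then some p.2 else o) o = (pvLV ps k).or o := by
  induction ps generalizing o with
  | nil => simp [pvLV]
  | cons q ps ih =>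
    simp only [pvLV, List.foldl_cons] at ih ⊢
    rw [ih (if q.1 = k then some q.2 else o), ih (if q.1 = k then some q.2 else none),
      Option.or_assoc]
    congr 1
    by_cases h : q.1 = k <;> simp [h]

theorem pvLV_cons (q : Int × Int) (ps : List (Int × Int)) (k : Int) :
    pvLV (q :: ps) k = (pvLV ps k).or (if q.1 = k then some q.2 else none) := by
  have h := pvLV_foldl ps k (if q.1 = k then some q.2 else none)
  simpa [pvLV] using h

theorem pvLV_none (ps : List (Int × Int)) (k : Int) (h : k ∉ ps.map Prod.fst) :
    pvLV ps k = none := by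
  induction ps with
  | nil => rfl
  | cons q ps ih =>
    simp only [List.map_cons, List.mem_cons, not_or] at h
    rw [pvLV_cons, ih h.2, if_neg (fun hh => h.1 hh.symm)]
    rfl

theorem pvLV_isSome (ps : List (Int × Int)) (k : Int) (h : k ∈ ps.map Prod.fst) :
    (pvLV ps k).isSome := by
  induction ps with
  | nil => simp at h
  | cons q ps ih =>
    rw [pvLV_cons, Option.isSome_or]
    simp only [List.map_cons, List.mem_cons] at h
    rcases h with h | h
    · rw [if_pos h.symm]; simp
    · simp [ih h]

theorem pvGet_update (ps : List (Int × Int)) (d : PySem.Dict Int Int) (k : Int) :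
    (d.update ps).get? k = (pvLV ps k).or (d.get? k) := by
  induction ps generalizing d with
  | nil => simp [PySem.Dict.update, pvLV]
  | cons q ps ih =>
    rw [pvUpdate_cons, ih, pvLV_cons, Option.or_assoc]
    congr 1
    rw [PySem.Dict.get?_insert]
    by_cases hk : k = q.1
    · rw [if_pos hk, if_pos hk.symm]; rfl
    · rw [if_neg hk, if_neg (fun hh => hk hh.symm)]; rfl

theorem pvKeys_update (ps : List (Int × Int)) (d : PySem.Dict Int Int) :
    (d.update ps).keys = PySem.Set.update d.keys (ps.map Prod.fst) := by
  induction ps generalizing d with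
  | nil => rfl
  | cons q ps ih =>
    rw [pvUpdate_cons, ih, List.map_cons, PySem.Set.update_cons]
    congr 1
    by_cases hc : d.contains q.1 = true
    · rw [PySem.Dict.keys_insert_of_contains d q.2 hc,
        PySem.Set.add_of_mem ((PySem.Dict.contains_iff_mem_keys d q.1).1 hc)]
    · have hm : q.1 ∉ d.keys := fun hm => hc ((PySem.Dict.contains_iff_mem_keys d q.1).2 hm)
      rw [PySem.Dict.keys_insert_of_not_contains d q.2 (by simpa using hc),
        PySem.Set.add_of_not_mem hm]

theorem pvNodup_update (ps : List (Int × Int)) (d : PySem.Dict Int Int) (h : d.keys.Nodup) :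
    (d.update ps).keys.Nodup := by
  rw [pvKeys_update]
  exact PySem.Set.nodup_update _ _ h

theorem pvDict_ext (d d' : PySem.Dict Int Int) (hk : d.keys = d'.keys) (hn : d.keys.Nodup)
    (hg : ∀ k, d.get? k = d'.get? k) : d = d' := by
  apply PySem.Dict.ext
  rw [PySem.Dict.items_eq_map_keys d hn 0, PySem.Dict.items_eq_map_keys d' (hk ▸ hn) 0, hk]
  apply List.map_congr_left
  intro k _
  rw [PySem.Dict.getD_eq_get?_getD, PySem.Dict.getD_eq_get?_getD, hg k]

theorem pvOverwrite (ps : List (Int × Int)) (d d' : PySem.Dict Int Int)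
    (hn : d.keys.Nodup) (hn' : d'.keys.Nodup)
    (hk : PySem.Set.update d.keys (ps.map Prod.fst) = PySem.Set.update d'.keys (ps.map Prod.fst))
    (hg : ∀ k, k ∈ ps.map Prod.fst ∨ d.get? k = d'.get? k) :
    d.update ps = d'.update ps := by
  apply pvDict_ext
  · rw [pvKeys_update, pvKeys_update, hk]
  · exact pvNodup_update _ _ hn
  · intro k
    rw [pvGet_update, pvGet_update]
    rcases hg k with hmem | heq
    · rcases Option.isSome_iff_exists.1 (pvLV_isSome ps k hmem) with ⟨v, hv⟩
      simp [hv]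
    · rw [heq]

theorem pvLV_find (ps : List (Int × Int)) (k : Int) (h : (ps.map Prod.fst).Nodup) :
    pvLV ps k = (ps.find? (fun p => p.1 == k)).map (fun x => x.2) := by
  induction ps with
  | nil => rfl
  | cons q ps ih =>
    simp only [List.map_cons, List.nodup_cons] at h
    rw [pvLV_cons]
    by_cases hk : q.1 = k
    · rw [if_pos hk, pvLV_none ps k (hk ▸ h.1), List.find?_cons_of_pos (by simpa using hk)]
      rfl
    · rw [if_neg hk, List.find?_cons_of_neg (by simpa using hk), ← ih h.2]
      simp

theorem pvLV_items (d : PySem.Dict Int Int) (k : Int) (h : d.keys.Nodup) :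
    pvLV d.items k = d.get? k := by
  rw [pvLV_find d.items k (by simpa [PySem.Dict.keys] using h)]
  rfl

theorem pvGet_ofList (qs : List (Int × Int)) (k : Int) :
    (PySem.Dict.ofList qs).get? k = pvLV qs k := by
  have h := pvGet_update qs PySem.Dict.empty k
  simpa [PySem.Dict.ofList, PySem.Dict.get?_empty] using h

theorem pvKeys_ofList (qs : List (Int × Int)) :
    (PySem.Dict.ofList qs).keys = PySem.Set.ofList (qs.map Prod.fst) := by
  have h := pvKeys_update qs PySem.Dict.empty
  simpa [PySem.Dict.ofList, PySem.Dict.keys_empty, PySem.Set.update_nil_left] using h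

theorem pvSet_update_subset (xs s : List Int) (h : ∀ x ∈ xs, x ∈ s) :
    PySem.Set.update s xs = s := by
  induction xs generalizing s with
  | nil => rfl
  | cons x xs ih =>
    rw [PySem.Set.update_cons, PySem.Set.add_of_mem (h x (List.mem_cons_self))]
    exact ih s (fun y hy => h y (List.mem_cons_of_mem _ hy))

theorem pvSet_update_ofList (s : List Int) (L : List Int) :
    PySem.Set.update s (PySem.Set.ofList L) = PySem.Set.update s L := by
  rw [PySem.Set.update_eq_append_filter, PySem.Set.update_eq_append_filter,
    PySem.Set.ofList_eq_self_of_nodup _ (PySem.Set.nodup_ofList L)]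

theorem pvUpdate_items (qs : List (Int × Int)) (d : PySem.Dict Int Int) (h : d.keys.Nodup) :
    d.update (PySem.Dict.ofList qs).items = d.update qs := by
  apply pvDict_ext
  · rw [pvKeys_update, pvKeys_update]
    have hfst : (PySem.Dict.ofList qs).items.map Prod.fst = PySem.Set.ofList (qs.map Prod.fst) :=
      pvKeys_ofList qs
    rw [hfst, pvSet_update_ofList]
  · exact pvNodup_update _ _ h
  · intro k
    rw [pvGet_update, pvGet_update]
    congr 1
    rw [pvLV_items _ k (by rw [pvKeys_ofList]; exact PySem.Set.nodup_ofList _)]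
    exact pvGet_ofList qs k

-- Invariant of A's shared dict right after `assignment.update({a: v})` (start of one p-iteration).
def pvStateOK (a : Int) (tl : List Int) (v : Int) (d : PySem.Dict Int Int) : Prop :=
  d.keys.Nodup ∧ (d.keys = [a] ∨ d.keys = PySem.Set.ofList (a :: tl)) ∧
  (a ∉ tl → d.get? a = some v) ∧ (∀ k, k ≠ a → k ∉ tl → d.get? k = none)

-- Invariant of A's shared dict between p-iterations.
def pvOuterOK (a : Int) (tl : List Int) (d : PySem.Dict Int Int) : Prop :=
  d.keys.Nodup ∧ (d.keys = [] ∨ d.keys = [a] ∨ d.keys = PySem.Set.ofList (a :: tl)) ∧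
  (∀ k, k ≠ a → k ∉ tl → d.get? k = none)

theorem pvStateOK_weaken (a : Int) (tl : List Int) (v : Int) (d : PySem.Dict Int Int)
    (h : pvStateOK a tl v d) : pvOuterOK a tl d := by
  obtain ⟨h1, h2, _, h4⟩ := h
  exact ⟨h1, by tauto, h4⟩

theorem pvKeysSingle (a v : Int) : ((PySem.Dict.empty : PySem.Dict Int Int).insert a v).keys = [a] := rfl

theorem pvInsertOK (a : Int) (tl : List Int) (v : Int) (d : PySem.Dict Int Int)
    (h : pvOuterOK a tl d) : pvStateOK a tl v (d.insert a v) := by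
  obtain ⟨h1, h2, h4⟩ := h
  have hkeys : (d.insert a v).keys = [a] ∨ (d.insert a v).keys = PySem.Set.ofList (a :: tl) := by
    rcases h2 with h2 | h2 | h2
    · left
      have hc : d.contains a = false := by
        by_contra hc
        have := (PySem.Dict.contains_iff_mem_keys d a).1 (by simpa using hc)
        rw [h2] at this; simp at this
      rw [PySem.Dict.keys_insert_of_not_contains d v hc, h2]
      rfl
    · left
      rw [PySem.Dict.keys_insert_of_contains d v
        ((PySem.Dict.contains_iff_mem_keys d a).2 (by rw [h2]; simp)), h2]
    · right
      rw [PySem.Dict.keys_insert_of_contains d v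
        ((PySem.Dict.contains_iff_mem_keys d a).2
          (by rw [h2]; exact (PySem.Set.mem_ofList _ _).2 (List.mem_cons_self))), h2]
  refine ⟨?_, hkeys, ?_, ?_⟩
  · rcases hkeys with hk | hk <;> rw [hk]
    · simp
    · exact PySem.Set.nodup_ofList _
  · intro _; exact PySem.Dict.get?_insert_self d a v
  · intro k hka hktl
    rw [PySem.Dict.get?_insert_of_ne d v hka]
    exact h4 k hka hktl

theorem pvSetSingleton (a : Int) (tl : List Int) :
    PySem.Set.ofList (a :: tl) = PySem.Set.update [a] tl := by
  simp [PySem.Set.ofList, PySem.Set.update]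

theorem pvSnapshot (a : Int) (tl : List Int) (v : Int) (d : PySem.Dict Int Int) (π : List Int)
    (h : pvStateOK a tl v d) (hl : tl.length ≤ π.length) :
    d.update (PySem.Dict.ofList (tl.zip π)).items = PySem.Dict.ofList ((a, v) :: tl.zip π) := by
  obtain ⟨h1, h2, h3, h4⟩ := h
  rw [pvUpdate_items _ _ h1]
  have hfst : (tl.zip π).map Prod.fst = tl := List.map_fst_zip hl
  have hins : PySem.Dict.ofList ((a, v) :: tl.zip π)
      = ((PySem.Dict.empty : PySem.Dict Int Int).insert a v).update (tl.zip π) := by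
    rw [PySem.Dict.ofList, pvUpdate_cons]
  rw [hins]
  apply pvOverwrite
  · exact h1
  · rw [pvKeysSingle]; simp
  · rw [hfst, pvKeysSingle]
    rcases h2 with h2 | h2 <;> rw [h2]
    · rw [pvSet_update_subset tl _
        (fun x hx => (PySem.Set.mem_ofList _ _).2 (List.mem_cons_of_mem _ hx))]
      exact pvSetSingleton a tl
  · intro k
    rw [hfst]
    by_cases hmem : k ∈ tl
    · exact Or.inl hmem
    right
    by_cases hka : k = a
    · subst hka
      rw [h3 hmem, PySem.Dict.get?_insert_self]
    · rw [h4 k hka hmem, PySem.Dict.get?_insert_of_ne PySem.Dict.empty v hka,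
        PySem.Dict.get?_empty]

theorem pvSnapshotOK (a : Int) (tl : List Int) (v : Int) (π : List Int)
    (hl : tl.length ≤ π.length) :
    pvStateOK a tl v (PySem.Dict.ofList ((a, v) :: tl.zip π)) := by
  have hfst : (tl.zip π).map Prod.fst = tl := List.map_fst_zip hl
  have hkeys : (PySem.Dict.ofList ((a, v) :: tl.zip π)).keys = PySem.Set.ofList (a :: tl) := by
    rw [pvKeys_ofList, List.map_cons, hfst]
  refine ⟨?_, Or.inr hkeys, ?_, ?_⟩
  · rw [hkeys]; exact PySem.Set.nodup_ofList _
  · intro hatl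
    rw [pvGet_ofList, pvLV_cons, pvLV_none _ _ (by rw [hfst]; exact hatl)]
    simp
  · intro k hka hktl
    rw [pvGet_ofList, pvLV_none]
    simp only [List.map_cons, hfst, List.mem_cons, not_or]
    exact ⟨hka, hktl⟩

theorem pvInner (a : Int) (tl : List Int) (v : Int)
    (Ps : List (List Int × List Int)) (d : PySem.Dict Int Int)
    (acc : List (PySem.Dict Int Int))
    (hd : pvStateOK a tl v d) (hlen : ∀ s ∈ Ps, tl.length ≤ s.1.length) :
    ((Ps.map (fun s => PySem.Dict.ofList (tl.zip s.1))).foldl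
        (fun (st2 : PySem.Dict Int Int × List (PySem.Dict Int Int)) r =>
          (st2.1.update r.items, st2.2 ++ [st2.1.update r.items])) (d, acc)).2
      = acc ++ Ps.map (fun s => PySem.Dict.ofList ((a, v) :: tl.zip s.1))
    ∧ pvStateOK a tl v ((Ps.map (fun s => PySem.Dict.ofList (tl.zip s.1))).foldl
        (fun (st2 : PySem.Dict Int Int × List (PySem.Dict Int Int)) r =>
          (st2.1.update r.items, st2.2 ++ [st2.1.update r.items])) (d, acc)).1 := by
  induction Ps generalizing d acc with
  | nil => exact ⟨by simp, hd⟩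
  | cons s Ps ih =>
    simp only [List.map_cons, List.foldl_cons]
    rw [pvSnapshot a tl v d s.1 hd (hlen s List.mem_cons_self)]
    obtain ⟨e1, e2⟩ := ih (PySem.Dict.ofList ((a, v) :: tl.zip s.1))
      (acc ++ [PySem.Dict.ofList ((a, v) :: tl.zip s.1)])
      (pvSnapshotOK a tl v s.1 (hlen s List.mem_cons_self))
      (fun s' hs' => hlen s' (List.mem_cons_of_mem _ hs'))
    exact ⟨by rw [e1]; simp, e2⟩

theorem pvExpandN_len (n : Nat) (pre vs : List Int) (s : List Int × List Int)
    (h : s ∈ pvExpandN n (pre, vs)) : s.1.length = pre.length + n := by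
  induction n generalizing pre vs with
  | zero =>
    simp only [pvExpandN, List.mem_singleton] at h
    rw [h]
    simp
  | succ n ih =>
    simp only [pvExpandN, List.mem_flatMap, List.mem_range] at h
    obtain ⟨i, _, hmem⟩ := h
    have := ih (pre ++ [vs.getD i 0]) _ hmem
    simp only [List.length_append, List.length_cons, List.length_nil] at this
    omega

theorem pvShift (n : Nat) (pre vs : List Int) :
    pvExpandN n (pre, vs) = (pvExpandN n ([], vs)).map (fun s => (pre ++ s.1, s.2)) := by
  induction n generalizing pre vs with
  | zero => simp [pvExpandN]
  | succ n ih =>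
    simp only [pvExpandN, List.map_flatMap]
    have hfun : (fun i => pvExpandN n (pre ++ [vs.getD i 0], vs.take i ++ vs.drop (i + 1)))
        = (fun i => (pvExpandN n ([] ++ [vs.getD i 0], vs.take i ++ vs.drop (i + 1))).map
            (fun s => (pre ++ s.1, s.2))) := by
      funext i
      rw [ih, ih ([] ++ [vs.getD i 0]), List.map_map]
      simp [Function.comp, List.append_assoc]
    rw [hfun]

theorem pvOuterFold (a : Int) (tl : List Int) (vertices : List Int)
    (Hrec : ∀ p, p < vertices.length →
      generate_assignments tl (vertices.take p ++ vertices.drop (p + 1)) =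
        (pvExpandN tl.length ([], vertices.take p ++ vertices.drop (p + 1))).map
          (fun s => PySem.Dict.ofList (tl.zip s.1)))
    (idxs : List Nat) (d : PySem.Dict Int Int) (acc : List (PySem.Dict Int Int))
    (hidx : ∀ p ∈ idxs, p < vertices.length) (hd : pvOuterOK a tl d) :
    (idxs.foldl
        (fun (st : PySem.Dict Int Int × List (PySem.Dict Int Int)) p =>
          List.foldl
            (fun (st2 : PySem.Dict Int Int × List (PySem.Dict Int Int)) r =>
              (st2.1.update r.items, st2.2 ++ [st2.1.update r.items]))
            (st.1.insert a (vertices.getD p 0), st.2)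
            (generate_assignments tl (vertices.take p ++ vertices.drop (p + 1))))
        (d, acc)).2
      = acc ++ idxs.flatMap (fun p =>
          (pvExpandN tl.length ([], vertices.take p ++ vertices.drop (p + 1))).map
            (fun s => PySem.Dict.ofList ((a, vertices.getD p 0) :: tl.zip s.1)))
    ∧ pvOuterOK a tl (idxs.foldl
        (fun (st : PySem.Dict Int Int × List (PySem.Dict Int Int)) p =>
          List.foldl
            (fun (st2 : PySem.Dict Int Int × List (PySem.Dict Int Int)) r =>
              (st2.1.update r.items, st2.2 ++ [st2.1.update r.items]))
            (st.1.insert a (vertices.getD p 0), st.2)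
            (generate_assignments tl (vertices.take p ++ vertices.drop (p + 1))))
        (d, acc)).1 := by
  induction idxs generalizing d acc with
  | nil => exact ⟨by simp, hd⟩
  | cons p idxs ih =>
    simp only [List.foldl_cons]
    rw [Hrec p (hidx p List.mem_cons_self)]
    obtain ⟨e1, hOK⟩ := pvInner a tl (vertices.getD p 0)
      (pvExpandN tl.length ([], vertices.take p ++ vertices.drop (p + 1)))
      (d.insert a (vertices.getD p 0)) acc
      (pvInsertOK a tl _ d hd)
      (fun s hs => by
        have := pvExpandN_len tl.length [] _ s hs
        simp only [List.length_nil] at this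
        omega)
    have hpair : ((pvExpandN tl.length ([], vertices.take p ++ vertices.drop (p + 1))).map
          (fun s => PySem.Dict.ofList (tl.zip s.1))).foldl
            (fun (st2 : PySem.Dict Int Int × List (PySem.Dict Int Int)) r =>
              (st2.1.update r.items, st2.2 ++ [st2.1.update r.items]))
            (d.insert a (vertices.getD p 0), acc)
        = ((((pvExpandN tl.length ([], vertices.take p ++ vertices.drop (p + 1))).map
          (fun s => PySem.Dict.ofList (tl.zip s.1))).foldl
            (fun (st2 : PySem.Dict Int Int × List (PySem.Dict Int Int)) r =>
              (st2.1.update r.items, st2.2 ++ [st2.1.update r.items]))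
            (d.insert a (vertices.getD p 0), acc)).1,
          acc ++ (pvExpandN tl.length ([], vertices.take p ++ vertices.drop (p + 1))).map
            (fun s => PySem.Dict.ofList ((a, vertices.getD p 0) :: tl.zip s.1))) :=
      Prod.ext_iff.2 ⟨rfl, e1⟩
    rw [hpair]
    obtain ⟨f1, f2⟩ := ih _ _ (fun q hq => hidx q (List.mem_cons_of_mem _ hq))
      (pvStateOK_weaken a tl (vertices.getD p 0) _ hOK)
    refine ⟨?_, f2⟩
    rw [f1, List.flatMap_cons, List.append_assoc]

theorem pvMain (agents vertices : List Int) (h : agents.length = vertices.length) :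
    generate_assignments agents vertices =
      (pvExpandN agents.length ([], vertices)).map
        (fun s => PySem.Dict.ofList (agents.zip s.1)) := by
  induction agents generalizing vertices with
  | nil => rfl
  | cons a tl ih =>
    have hlen : vertices.length = tl.length + 1 := by
      simpa using h.symm
    have Hrec : ∀ p, p < vertices.length →
        generate_assignments tl (vertices.take p ++ vertices.drop (p + 1)) =
          (pvExpandN tl.length ([], vertices.take p ++ vertices.drop (p + 1))).map
            (fun s => PySem.Dict.ofList (tl.zip s.1)) := by
      intro p hp
      apply ih
      simp only [List.length_append, List.length_take, List.length_drop]
      omega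
    obtain ⟨e1, _⟩ := pvOuterFold a tl vertices Hrec (List.range vertices.length)
      PySem.Dict.empty [] (fun p hp => List.mem_range.1 hp)
      ⟨by rw [PySem.Dict.keys_empty]; exact List.nodup_nil,
        Or.inl PySem.Dict.keys_empty,
        fun k _ _ => PySem.Dict.get?_empty k⟩
    rw [generate_assignments, e1, List.nil_append]
    simp only [List.length_cons, pvExpandN, List.map_flatMap]
    have hfun : (fun p => (pvExpandN tl.length ([], vertices.take p ++ vertices.drop (p + 1))).map
          (fun s => PySem.Dict.ofList ((a, vertices.getD p 0) :: tl.zip s.1)))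
        = (fun i => (pvExpandN tl.length
            ([] ++ [vertices.getD i 0], vertices.take i ++ vertices.drop (i + 1))).map
            (fun s => PySem.Dict.ofList ((a :: tl).zip s.1))) := by
      funext i
      rw [List.nil_append, pvShift tl.length [vertices.getD i 0], List.map_map]
      apply List.map_congr_left
      intro s _
      simp [List.zip_cons_cons]
    rw [hfun]

theorem pvCopy (d : PySem.Dict Int Int) (h : d.keys.Nodup) :
    PySem.Dict.empty.update d.items = d := by
  apply pvDict_ext
  · rw [pvKeys_update]
    show PySem.Set.update (PySem.Dict.empty : PySem.Dict Int Int).keys d.keys = d.keys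
    rw [PySem.Dict.keys_empty, PySem.Set.update_nil_left]
    exact PySem.Set.ofList_eq_self_of_nodup _ h
  · exact pvNodup_update _ _ (by rw [PySem.Dict.keys_empty]; exact List.nodup_nil)
  · intro k
    rw [pvGet_update, pvLV_items _ _ h, PySem.Dict.get?_empty]
    simp

theorem pvBfold (L : List Int) (states : List (List Int × List Int)) :
    L.foldl
      (fun (states : List (List Int × List Int)) _ =>
        states.flatMap (fun s =>
          (List.range s.2.length).map (fun i =>
            (s.1 ++ [s.2.getD i 0], s.2.take i ++ s.2.drop (i + 1)))))
      states
    = states.flatMap (pvExpandN L.length) := by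
  induction L generalizing states with
  | nil =>
    simp only [List.foldl_nil, List.length_nil]
    have : pvExpandN 0 = fun (s : List Int × List Int) => [s] := by
      funext s; rfl
    rw [this, List.flatMap_singleton']
  | cons x L ih =>
    simp only [List.foldl_cons, List.length_cons]
    rw [ih, List.flatMap_assoc]
    have hfun : (fun (s : List Int × List Int) =>
        ((List.range s.2.length).map (fun i =>
          (s.1 ++ [s.2.getD i 0], s.2.take i ++ s.2.drop (i + 1)))).flatMap
          (pvExpandN L.length))
      = pvExpandN (L.length + 1) := by
      funext s
      rw [List.flatMap_map]
      rfl
    rw [hfun]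

-- ===== VERDICT (by name: the statement is the Claim_ definition above) =====
theorem generate_all_assignments_spec : Claim_equal_generate_all_assignments := by
  intro agents vertices _ hpre
  unfold Pre_generate_all_assignments at hpre
  unfold Spec_generate_all_assignments generate_all_assignments generate_all_assignments_alt
  rw [pvBfold, pvMain agents vertices hpre, hpre]
  simp only [List.flatMap_cons, List.flatMap_nil, List.append_nil, List.map_map]
  apply List.map_congr_left
  intro s _
  simp only [Function.comp]
  rw [pvCopy _ (by rw [pvKeys_ofList]; exact PySem.Set.nodup_ofList _)]
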